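-- pv_equiv track=rewrite | github.com/pypi-data/pypi-mirror-333 | packages/chemparse/chemparse-0.3.2-py3-none-any.whl/chemparse/fun.py | get_first_elem
-- ===== SOURCE A (Python) =====
-- from typing import Generator
-- from typing import Any, Tuple, Dict, List
--
-- def find_all(sub:str, a_str:str) -> Generator[int , Any , None]:
--     start:int = 0
--     while True:
--         start = a_str.find(sub, start)
--         if start == -1: return
--         yield start
--         start += len(sub) # use start += 1 to find overlapping matches
--
-- def get_first_elem(formula:str) -> Tuple[str, bool]:
--     needed_split:bool = False
--     for char in formula:
--         if formula.find(char) != 0 and (char.isupper() or char == "+" or char == "-"):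
--             formula = formula.split(char)[0]
--             needed_split = True
--             return formula, needed_split
--
--         char_ind = list(find_all(char, formula))
--         if len(char_ind) > 1 and (char.isupper() or char == "+" or char == "-") and (formula[1] == char or formula[1].islower()) and sum(1 for c in formula[0:char_ind[1]] if c.isupper())==1:
--             formula = formula[0:char_ind[1]]
--             needed_split = True
--             return formula, needed_split
--
--     return formula, needed_split
-- ===== SOURCE B (Python) =====
-- def get_first_elem(formula):
--     # One fused O(n) pass with accumulators (j = first repeat of formula[0] after 0,
--     # k = first special char differing from formula[0], uj = uppercase count in
--     # formula[:j]); the decision is made once at the end instead of A's per-character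
--     # find/find_all/split rescans.
--     if not formula:
--         return formula, False
--     c0 = formula[0]
--     u0 = 1 if c0.isupper() else 0
--     j, k, uj, up = -1, -1, u0, u0
--     for i in range(1, len(formula)):
--         c = formula[i]
--         if j == -1:
--             if c == c0:
--                 j, uj = i, up
--             elif c.isupper():
--                 up += 1
--         if k == -1 and c != c0 and (c.isupper() or c == "+" or c == "-"):
--             k = i
--     if (c0.isupper() or c0 == "+" or c0 == "-") and j != -1 \
--        and (formula[1] == c0 or formula[1].islower()) and uj == 1:
--         return formula[:j], True
--     if k != -1:
--         return formula[:k], True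
--     return formula, False
-- ===== Notes on version B (the rewrite author's own statement) =====
-- stated objective: faster
-- what changed: Replaces A's per-character rescans (formula.find, a find_all generator and split recomputed inside the loop) with one fused left-to-right pass that maintains three accumulators (first repeat of the head char, first differing special char, running uppercase count) and makes the cut decision once after the pass.
import Mathlib
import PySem

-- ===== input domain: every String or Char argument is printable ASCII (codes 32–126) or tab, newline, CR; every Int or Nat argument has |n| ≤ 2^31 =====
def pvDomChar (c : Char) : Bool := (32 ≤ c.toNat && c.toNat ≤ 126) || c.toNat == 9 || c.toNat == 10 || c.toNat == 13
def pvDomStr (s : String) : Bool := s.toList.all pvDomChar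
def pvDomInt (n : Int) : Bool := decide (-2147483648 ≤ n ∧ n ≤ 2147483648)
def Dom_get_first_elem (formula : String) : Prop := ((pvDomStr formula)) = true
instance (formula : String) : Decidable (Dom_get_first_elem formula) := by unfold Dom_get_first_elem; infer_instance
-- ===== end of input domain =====

-- B replaces A's per-character rescans by one fused pass with accumulators and a single final decision; return value only, no mutation.

-- ===== PORT A =====
-- helper find_all of Source A (generator, materialised by list(...)); fuel s.length+1 bounds the
-- while-loop (sub is always a single char here, so start strictly increases each step)
def findAllAux (sub s : List Char) (start : Int) : Nat → List Int
  | 0 => []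
  | fuel + 1 =>
    if PySem.Chars.findFrom s sub start = -1 then []
    else PySem.Chars.findFrom s sub start ::
         findAllAux sub s (PySem.Chars.findFrom s sub start + (sub.length : Int)) fuel

def find_all (sub s : List Char) : List Int := findAllAux sub s 0 (s.length + 1)

-- sum(1 for c in l if c.isupper()) — this generator-sum appears in Source A (and B keeps a running version of it)
def countU (l : List Char) : Int :=
  l.foldl (fun acc ch => if PySem.Chars.isupper ch then acc + 1 else acc) 0

-- formula.find(char) != 0 and (char.isupper() or char == "+" or char == "-")
def cond1A (cs : List Char) (c : Char) : Bool :=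
  (PySem.Chars.find cs [c] != 0) && (PySem.Chars.isupper c || c == '+' || c == '-')

-- len(char_ind) > 1 and (…) and (formula[1] == char or formula[1].islower()) and sum(…) == 1
-- formula[1] is guarded by len(char_ind) > 1 (two occurrences force len ≥ 2), so .getD ' ' is never used
def cond2A (cs : List Char) (char_ind : List Int) (c : Char) : Bool :=
  decide (1 < char_ind.length) && (PySem.Chars.isupper c || c == '+' || c == '-')
  && ((PySem.List.pyGet? cs 1).getD ' ' == c
      || PySem.Chars.islower ((PySem.List.pyGet? cs 1).getD ' '))
  && (countU (PySem.List.slice cs (some 0)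
        (some (PySem.List.pyGetD char_ind 1 0))) == 1)

-- the for-loop of Source A (formula is only reassigned immediately before a return, so the
-- iteration and all conditions read the original string cs)
def goA (cs : List Char) : List Char → Bool → String × Bool
  | [], ns => (String.mk cs, ns)
  | c :: it, ns =>
    if cond1A cs c then
      (String.mk ((PySem.Chars.splitOn cs [c]).headD []), true)
    else if cond2A cs (find_all [c] cs) c then
      (String.mk (PySem.List.slice cs (some 0)
        (some (PySem.List.pyGetD (find_all [c] cs) 1 0))), true)
    else goA cs it ns

def get_first_elem (formula : String) : String × Bool :=
  goA formula.toList formula.toList false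

-- ===== PORT B =====
def specialB (c : Char) : Bool := PySem.Chars.isupper c || c == '+' || c == '-'

-- the for-loop of Source B: state (j, k, uj, up), index i running over positions 1..n-1
def loopB (c0 : Char) : List Char → Int → Int × Int × Int × Int → Int × Int × Int × Int
  | [], _, st => st
  | c :: rest, i, (j, k, uj, up) =>
    let t : Int × Int × Int :=
      if j == -1 then
        if c == c0 then (i, up, up)
        else if PySem.Chars.isupper c then (j, uj, up + 1)
        else (j, uj, up)
      else (j, uj, up)
    let k' : Int := if k == -1 && c != c0 && specialB c then i else k
    loopB c0 rest (i + 1) (t.1, k', t.2.1, t.2.2)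

-- formula[1] is guarded by j != -1 (a repeat of c0 after index 0 forces len ≥ 2)
def get_first_elem_alt (formula : String) : String × Bool :=
  match formula.toList with
  | [] => (String.mk [], false)
  | c0 :: rest =>
    let cs := c0 :: rest
    let u0 : Int := if PySem.Chars.isupper c0 then 1 else 0
    let r := loopB c0 rest 1 (-1, -1, u0, u0)
    if specialB c0 && r.1 != -1
       && ((PySem.List.pyGet? cs 1).getD ' ' == c0
           || PySem.Chars.islower ((PySem.List.pyGet? cs 1).getD ' '))
       && (r.2.2.1 == 1)
    then (String.mk (PySem.List.slice cs (some 0) (some r.1)), true)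
    else if r.2.1 != -1 then
      (String.mk (PySem.List.slice cs (some 0) (some r.2.1)), true)
    else (String.mk cs, false)

-- ===== PRECONDITION & SPEC =====
def Spec_get_first_elem (formula : String) (out : String × Bool) : Prop := out = get_first_elem_alt formula
instance (formula : String) (out : String × Bool) : Decidable (Spec_get_first_elem formula out) := by unfold Spec_get_first_elem; infer_instance

-- ===== CLAIM (what is proved, stated in full; the proofs are below) =====
def Claim_equal_get_first_elem : Prop := ∀ (formula : String), Dom_get_first_elem formula → Spec_get_first_elem formula (get_first_elem formula)

-- ===== LEMMAS AND PROOFS =====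

-- proof-only reference form shared by both sides: first repeat of c0 after 0 (as firstIdx on
-- the tail), first special char ≠ c0 (scanB), and explicit slices
def scanB (c0 : Char) : List Char → Nat → Option Nat
  | [], _ => none
  | c :: rest, i => if c != c0 && specialB c then some i else scanB c0 rest (i + 1)

def firstIdx (c0 : Char) : List Char → Option Nat
  | [] => none
  | c :: rest => if c = c0 then some 0 else (firstIdx c0 rest).map (· + 1)

def altSpec (formula : String) : String × Bool :=
  match formula.toList with
  | [] => (String.mk [], false)
  | c0 :: rest =>
    let cs := c0 :: rest
    let hit : Option (List Char) :=
      if specialB c0 then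
        if PySem.Chars.findFrom cs [c0] 1 != -1
           && ((PySem.List.pyGet? cs 1).getD ' ' == c0
               || PySem.Chars.islower ((PySem.List.pyGet? cs 1).getD ' '))
           && (countU (PySem.List.slice cs (some 0)
                 (some (PySem.Chars.findFrom cs [c0] 1))) == 1)
        then some (PySem.List.slice cs (some 0) (some (PySem.Chars.findFrom cs [c0] 1)))
        else none
      else none
    match hit with
    | some p => (String.mk p, true)
    | none =>
      match scanB c0 rest 1 with
      | some i => (String.mk (PySem.List.slice cs (some 0) (some (i : Int))), true)
      | none => (String.mk cs, false)

lemma sing_prefix (c : Char) (l : List Char) : [c] <+: l ↔ l[0]? = some c := by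
  cases l with
  | nil => simp
  | cons h t => simp [List.cons_prefix_cons, eq_comm]

lemma sing_prefix_drop (c : Char) (l : List Char) (i : Nat) :
    [c] <+: l.drop i ↔ l[i]? = some c := by
  rw [sing_prefix]
  simp [List.getElem?_drop]

lemma sing_infix (c : Char) (l : List Char) : [c] <:+: l ↔ c ∈ l := by
  constructor
  · rintro ⟨s, t, rfl⟩; simp
  · intro h
    obtain ⟨s, t, rfl⟩ := List.append_of_mem h
    exact ⟨s, t, by simp⟩

lemma find_sing_eq (l : List Char) (c : Char) (k : Nat)
    (h1 : l[k]? = some c) (h2 : ∀ i, i < k → l[i]? ≠ some c) :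
    PySem.Chars.find l [c] = (k : Int) := by
  have hinf : [c] <:+: l := (sing_infix c l).2 (List.mem_of_getElem? h1)
  have h0 : 0 ≤ PySem.Chars.find l [c] := (PySem.Chars.find_nonneg_iff l [c]).2 hinf
  obtain ⟨hp, hmin⟩ := PySem.Chars.find_spec h0
  have hm1 : l[(PySem.Chars.find l [c]).toNat]? = some c := (sing_prefix_drop _ _ _).1 hp
  rcases lt_trichotomy (PySem.Chars.find l [c]).toNat k with h | h | h
  · exact absurd hm1 (h2 _ h)
  · rw [← Int.toNat_of_nonneg h0, h]
  · exact absurd ((sing_prefix_drop _ _ _).2 h1) (hmin k h)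

lemma go_acc (sep : List Char) :
    ∀ (fuel : Nat) (l cur : List Char) (acc : List (List Char)),
      PySem.Chars.splitOn.go sep fuel l cur acc
        = acc.reverse ++ PySem.Chars.splitOn.go sep fuel l cur [] := by
  intro fuel
  induction fuel with
  | zero => intro l cur acc; simp [PySem.Chars.splitOn.go]
  | succ f ih =>
    intro l cur acc
    cases l with
    | nil => simp [PySem.Chars.splitOn.go]
    | cons h t =>
      by_cases hp : sep.isPrefixOf (h :: t) = true
      · simp only [PySem.Chars.splitOn.go, if_pos hp]
        rw [ih _ _ (cur.reverse :: acc), ih _ _ [cur.reverse]]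
        simp
      · simp only [PySem.Chars.splitOn.go, if_neg hp]
        exact ih t (h :: cur) acc

lemma go_headD (c : Char) :
    ∀ (k fuel : Nat) (l cur : List Char), k < fuel → l[k]? = some c →
      (∀ i, i < k → l[i]? ≠ some c) →
      (PySem.Chars.splitOn.go [c] fuel l cur []).headD [] = cur.reverse ++ l.take k := by
  intro k
  induction k with
  | zero =>
    intro fuel l cur hf h1 _
    cases fuel with
    | zero => omega
    | succ f =>
      cases l with
      | nil => simp at h1
      | cons h t =>
        simp only [List.getElem?_cons_zero, Option.some.injEq] at h1
        subst h1
        have hp : [h].isPrefixOf (h :: t) = true := by simp [List.isPrefixOf]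
        simp only [PySem.Chars.splitOn.go, if_pos hp]
        rw [go_acc]
        simp
  | succ k ih =>
    intro fuel l cur hf h1 h2
    cases fuel with
    | zero => omega
    | succ f =>
      cases l with
      | nil => simp at h1
      | cons h t =>
        have hhc : h ≠ c := by
          intro e
          exact h2 0 (Nat.succ_pos k) (by simp [e])
        have hp : [c].isPrefixOf (h :: t) = false := by
          simp only [List.isPrefixOf, Bool.and_eq_false_iff]
          left; simp; exact fun e => hhc e.symm
        simp only [PySem.Chars.splitOn.go, hp, Bool.false_eq_true, if_false]
        rw [ih f t (h :: cur) (by omega) (by simpa using h1)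
            (fun i hi => by simpa using h2 (i + 1) (by omega))]
        simp

lemma splitOn_headD (l : List Char) (c : Char) (k : Nat)
    (h1 : l[k]? = some c) (h2 : ∀ i, i < k → l[i]? ≠ some c) :
    (PySem.Chars.splitOn l [c]).headD [] = l.take k := by
  have hk : k < l.length := by
    by_contra h
    rw [List.getElem?_eq_none (by omega)] at h1
    simp at h1
  have := go_headD c k (l.length + 1) l [] (by omega) h1 h2
  simpa [PySem.Chars.splitOn] using this

lemma find_head_zero (c0 : Char) (rest : List Char) :
    PySem.Chars.find (c0 :: rest) [c0] = 0 := by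
  have := find_sing_eq (c0 :: rest) c0 0 (by simp) (fun i hi => by omega)
  simpa using this

lemma find_all_cons (c0 : Char) (rest : List Char) :
    find_all [c0] (c0 :: rest) =
      0 :: (if PySem.Chars.findFrom (c0 :: rest) [c0] 1 = -1 then []
            else PySem.Chars.findFrom (c0 :: rest) [c0] 1 ::
                 findAllAux [c0] (c0 :: rest)
                   (PySem.Chars.findFrom (c0 :: rest) [c0] 1 + 1) rest.length) := by
  show findAllAux [c0] (c0 :: rest) 0 ((c0 :: rest).length + 1) = _
  have hlen : (c0 :: rest).length + 1 = rest.length + 1 + 1 := by simp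
  rw [hlen]
  simp only [findAllAux, PySem.Chars.findFrom_zero, find_head_zero]
  norm_num

lemma goA_eq_scan (c0 : Char) (rest : List Char)
    (hC2 : cond2A (c0 :: rest) (find_all [c0] (c0 :: rest)) c0 = false) :
    ∀ (suf pre : List Char), rest = pre ++ suf →
      (∀ c ∈ pre, c = c0 ∨ (PySem.Chars.isupper c || c == '+' || c == '-') = false) →
      goA (c0 :: rest) suf false =
        (match scanB c0 suf (1 + pre.length) with
         | some i => (String.mk ((c0 :: rest).take i), true)
         | none => (String.mk (c0 :: rest), false)) := by
  intro suf
  induction suf with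
  | nil => intro pre _ _; simp [goA, scanB]
  | cons c suf' ih =>
    intro pre hsplit hpre
    have hidx : (c0 :: rest)[1 + pre.length]? = some c := by
      subst hsplit
      have h1 : 1 + pre.length = pre.length + 1 := by omega
      rw [h1]
      simp
    by_cases hcc : c = c0
    · subst hcc
      have hc1 : cond1A (c :: rest) c = false := by
        simp [cond1A, find_head_zero]
      rw [goA, if_neg (by simp [hc1]), if_neg (by simp [hC2])]
      have := ih (pre ++ [c]) (by simp [hsplit]) (by
        intro d hd
        rcases List.mem_append.1 hd with h | h
        · exact hpre d h
        · left; simpa using h)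
      rw [this]
      have hlen : 1 + (pre ++ [c]).length = 1 + pre.length + 1 := by simp; omega
      rw [hlen] at this ⊢
      simp [scanB]
    · by_cases hsp : (PySem.Chars.isupper c || c == '+' || c == '-') = true
      · -- first special character after the head: both sides return the prefix before it
        have h2 : ∀ i, i < 1 + pre.length → (c0 :: rest)[i]? ≠ some c := by
          intro i hi
          cases i with
          | zero =>
            simp only [List.getElem?_cons_zero]
            exact fun e => hcc (Option.some.inj e).symm
          | succ m =>
            have hm : m < pre.length := by omega
            subst hsplit
            rw [List.getElem?_cons_succ, List.getElem?_append_left hm]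
            rw [List.getElem?_eq_getElem hm]
            intro e
            have he : pre[m] = c := Option.some.inj e
            rcases hpre pre[m] (List.getElem_mem hm) with h | h
            · exact hcc (he ▸ h)
            · rw [he] at h; rw [h] at hsp; exact Bool.noConfusion hsp
        have hfind : PySem.Chars.find (c0 :: rest) [c] = ((1 + pre.length : Nat) : Int) :=
          find_sing_eq _ _ _ hidx h2
        have hc1 : cond1A (c0 :: rest) c = true := by
          simp [cond1A, hfind, hsp]
          omega
        rw [goA, if_pos hc1]
        rw [splitOn_headD _ _ _ hidx h2]
        have hscan : scanB c0 (c :: suf') (1 + pre.length) = some (1 + pre.length) := by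
          simp [scanB, hcc, specialB, hsp]
        rw [hscan]
      · -- not special: both sides skip this character
        have hspf : (PySem.Chars.isupper c || c == '+' || c == '-') = false :=
          Bool.not_eq_true _ ▸ (by simpa using hsp)
        have hc1 : cond1A (c0 :: rest) c = false := by simp [cond1A, hspf]
        have hc2 : cond2A (c0 :: rest) (find_all [c] (c0 :: rest)) c = false := by
          simp [cond2A, hspf]
        rw [goA, if_neg (by simp [hc1]), if_neg (by simp [hc2])]
        have := ih (pre ++ [c]) (by simp [hsplit]) (by
          intro d hd
          rcases List.mem_append.1 hd with h | h
          · exact hpre d h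
          · have hdc : d = c := by simpa using h
            right; rw [hdc]; exact hspf)
        rw [this]
        have hlen : 1 + (pre ++ [c]).length = 1 + pre.length + 1 := by simp; omega
        rw [hlen] at this ⊢
        simp [scanB, specialB, hspf]

lemma pyGetD_one (a b : Int) (t : List Int) : PySem.List.pyGetD (a :: b :: t) 1 0 = b := by
  have h : (1 : Int) < (t.length : Int) + 1 + 1 := by omega
  simp [PySem.List.pyGetD, PySem.List.pyGet?, PySem.List.pyIdx?, h]

-- ---- A = altSpec ----
lemma A_eq_altSpec (formula : String) : get_first_elem formula = altSpec formula := by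
  unfold get_first_elem altSpec
  cases h : formula.toList with
  | nil => simp [goA]
  | cons c0 rest =>
    have hc1 : cond1A (c0 :: rest) c0 = false := by simp [cond1A, find_head_zero]
    by_cases hneg : PySem.Chars.findFrom (c0 :: rest) [c0] 1 = -1
    · have hc2 : cond2A (c0 :: rest) (find_all [c0] (c0 :: rest)) c0 = false := by
        rw [find_all_cons, if_pos hneg]; simp [cond2A]
      rw [goA, if_neg (by simp [hc1]), if_neg (by simp [hc2])]
      rw [goA_eq_scan c0 rest hc2 rest [] rfl (by simp)]
      cases hscan : scanB c0 rest 1 with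
      | none => simp [hscan, hneg]
      | some i => simp [hscan, hneg]
    · have hfa : find_all [c0] (c0 :: rest)
          = 0 :: PySem.Chars.findFrom (c0 :: rest) [c0] 1 ::
            findAllAux [c0] (c0 :: rest)
              (PySem.Chars.findFrom (c0 :: rest) [c0] 1 + 1) rest.length := by
        rw [find_all_cons, if_neg hneg]
      have hget : PySem.List.pyGetD (find_all [c0] (c0 :: rest)) 1 0
          = PySem.Chars.findFrom (c0 :: rest) [c0] 1 := by
        rw [hfa, pyGetD_one]
      have hJ : (PySem.Chars.findFrom (c0 :: rest) [c0] 1 != -1) = true := by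
        simp [hneg]
      by_cases hsp : specialB c0 = true
      · by_cases hXY : (((PySem.List.pyGet? (c0 :: rest) 1).getD ' ' == c0
               || PySem.Chars.islower ((PySem.List.pyGet? (c0 :: rest) 1).getD ' '))
             && (countU (PySem.List.slice (c0 :: rest) (some 0)
                   (some (PySem.Chars.findFrom (c0 :: rest) [c0] 1))) == 1)) = true
        · rw [Bool.and_eq_true] at hXY
          have hc2 : cond2A (c0 :: rest) (find_all [c0] (c0 :: rest)) c0 = true := by
            simp only [cond2A, hget, Bool.and_eq_true]
            refine ⟨⟨⟨?_, by simpa [specialB] using hsp⟩, hXY.1⟩, hXY.2⟩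
            rw [hfa]
            simp only [List.length_cons, decide_eq_true_eq]
            omega
          rw [goA, if_neg (by simp [hc1]), if_pos hc2, hget]
          have h2 := hXY.2
          simp at h2
          simp [hsp, hJ, hXY.1, h2]
        · have hXYf : (((PySem.List.pyGet? (c0 :: rest) 1).getD ' ' == c0
               || PySem.Chars.islower ((PySem.List.pyGet? (c0 :: rest) 1).getD ' '))
             && (countU (PySem.List.slice (c0 :: rest) (some 0)
                   (some (PySem.Chars.findFrom (c0 :: rest) [c0] 1))) == 1)) = false := by
            simpa using hXY
          have hc2 : cond2A (c0 :: rest) (find_all [c0] (c0 :: rest)) c0 = false := by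
            simp only [cond2A, hget]
            rcases Bool.and_eq_false_iff.1 hXYf with hx | hy
            · simp [hx]
            · have h2 := hy; simp at h2; simp [h2]
          rw [goA, if_neg (by simp [hc1]), if_neg (by simp [hc2])]
          rw [goA_eq_scan c0 rest hc2 rest [] rfl (by simp)]
          have hcond : ((PySem.Chars.findFrom (c0 :: rest) [c0] 1 != -1)
              && ((PySem.List.pyGet? (c0 :: rest) 1).getD ' ' == c0
                  || PySem.Chars.islower ((PySem.List.pyGet? (c0 :: rest) 1).getD ' '))
              && (countU (PySem.List.slice (c0 :: rest) (some 0)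
                    (some (PySem.Chars.findFrom (c0 :: rest) [c0] 1))) == 1)) = false := by
            rcases Bool.and_eq_false_iff.1 hXYf with hx | hy
            · simp [hx]
            · have h2 := hy; simp at h2; simp [h2]
          cases hscan : scanB c0 rest 1 with
          | none => simp only [hsp, hcond]; simp [hscan]
          | some i => simp only [hsp, hcond]; simp [hscan]
      · have hspf : specialB c0 = false := by simpa using hsp
        have hc2 : cond2A (c0 :: rest) (find_all [c0] (c0 :: rest)) c0 = false := by
          have : (PySem.Chars.isupper c0 || c0 == '+' || c0 == '-') = false := by
            simpa [specialB] using hspf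
          simp [cond2A, this]
        rw [goA, if_neg (by simp [hc1]), if_neg (by simp [hc2])]
        rw [goA_eq_scan c0 rest hc2 rest [] rfl (by simp)]
        cases hscan : scanB c0 rest 1 with
        | none => simp [hscan, hspf]
        | some i => simp [hscan, hspf]

-- ---- B = altSpec ----

-- pure forms of loopB's two independent state threads
def kRun (c0 : Char) : List Char → Int → Int → Int
  | [], _, k => k
  | c :: rest, i, k =>
    kRun c0 rest (i + 1) (if k == -1 && c != c0 && specialB c then i else k)

def jRun (c0 : Char) : List Char → Int → Int × Int × Int → Int × Int × Int
  | [], _, st => st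
  | c :: rest, i, (j, uj, up) =>
    let t : Int × Int × Int :=
      if j == -1 then
        if c == c0 then (i, up, up)
        else if PySem.Chars.isupper c then (j, uj, up + 1)
        else (j, uj, up)
      else (j, uj, up)
    jRun c0 rest (i + 1) t

lemma loopB_split (c0 : Char) :
    ∀ (suf : List Char) (i j k uj up : Int),
      loopB c0 suf i (j, k, uj, up)
        = ((jRun c0 suf i (j, uj, up)).1, kRun c0 suf i k,
           (jRun c0 suf i (j, uj, up)).2.1, (jRun c0 suf i (j, uj, up)).2.2) := by
  intro suf
  induction suf with
  | nil => intro i j k uj up; simp [loopB, jRun, kRun]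
  | cons c rest ih =>
    intro i j k uj up
    simp only [loopB, jRun, kRun]
    by_cases hj : j == -1
    · by_cases hc : c == c0
      · simp [hj, hc, ih]
      · by_cases hu : PySem.Chars.isupper c
        · simp [hj, hc, hu, ih]
        · simp [hj, hc, hu, ih]
    · simp [hj, ih]

lemma kRun_frozen (c0 : Char) :
    ∀ (suf : List Char) (i k : Int), k ≠ -1 → kRun c0 suf i k = k := by
  intro suf
  induction suf with
  | nil => intro i k _; simp [kRun]
  | cons c rest ih =>
    intro i k hk
    have : (k == -1) = false := by simp [hk]
    simp [kRun, this, ih _ _ hk]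

lemma kRun_eq_scanB (c0 : Char) :
    ∀ (suf : List Char) (i : Nat),
      kRun c0 suf (i : Int) (-1)
        = (match scanB c0 suf i with
           | some m => ((m : Nat) : Int)
           | none => (-1 : Int)) := by
  intro suf
  induction suf with
  | nil => intro i; simp [kRun, scanB]
  | cons c rest ih =>
    intro i
    by_cases hc : (c != c0 && specialB c) = true
    · have hi : ((i : Int) ≠ -1) := by omega
      have hcond : (((-1 : Int) == -1) && c != c0 && specialB c) = true := by
        rw [Bool.and_assoc]; simp [hc]
      simp [kRun, scanB, hc, kRun_frozen c0 rest _ _ hi]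
    · have hc' : (c != c0 && specialB c) = false := by simpa using hc
      have hcond : (((-1 : Int) == -1) && c != c0 && specialB c) = false := by
        rw [Bool.and_assoc]; simp [hc']
      have hcast : (i : Int) + 1 = ((i + 1 : Nat) : Int) := by push_cast; ring
      simp only [kRun, scanB, hcond, hc', Bool.false_eq_true, if_false, hcast]
      exact ih (i + 1)

lemma countU_acc (l : List Char) : ∀ (a : Int),
    l.foldl (fun acc ch => if PySem.Chars.isupper ch then acc + 1 else acc) a
      = a + countU l := by
  induction l with
  | nil => intro a; simp [countU]
  | cons c rest ih =>
    intro a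
    have hc : countU (c :: rest)
        = (if PySem.Chars.isupper c then (1 : Int) else 0) + countU rest := by
      simp only [countU, List.foldl]
      rw [ih]
      by_cases hu : PySem.Chars.isupper c <;> simp [countU, hu] <;> ring
    simp only [List.foldl]
    rw [ih, hc]
    by_cases hu : PySem.Chars.isupper c <;> simp [countU, hu] <;> ring

lemma countU_cons (c : Char) (l : List Char) :
    countU (c :: l) = (if PySem.Chars.isupper c then 1 else 0) + countU l := by
  simp only [countU, List.foldl]
  rw [countU_acc]
  by_cases hu : PySem.Chars.isupper c <;> simp [countU, hu] <;> ring

lemma jRun_frozen (c0 : Char) :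
    ∀ (suf : List Char) (i j uj up : Int), j ≠ -1 →
      jRun c0 suf i (j, uj, up) = (j, uj, up) := by
  intro suf
  induction suf with
  | nil => intro i j uj up _; simp [jRun]
  | cons c rest ih =>
    intro i j uj up hj
    have : (j == -1) = false := by simp [hj]
    simp [jRun, this, ih _ _ _ _ hj]

lemma jRun_spec (c0 : Char) :
    ∀ (suf : List Char) (i : Nat) (a b : Int),
      jRun c0 suf (i : Int) (-1, a, b)
        = (match firstIdx c0 suf with
           | some m => (((i + m : Nat) : Int), b + countU (suf.take m), b + countU (suf.take m))
           | none => (-1, a, b + countU suf)) := by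
  intro suf
  induction suf with
  | nil => intro i a b; simp [jRun, firstIdx, countU]
  | cons c rest ih =>
    intro i a b
    by_cases hc : c = c0
    · have hi : ((i : Int) ≠ -1) := by omega
      have hfz := jRun_frozen c0 rest ((i : Int) + 1) (i : Int) b b hi
      simp [jRun, hc, firstIdx, countU, hfz]
    · have hc' : (c == c0) = false := by simp [hc]
      have hcast : (i : Int) + 1 = ((i + 1 : Nat) : Int) := by push_cast; ring
      by_cases hu : PySem.Chars.isupper c
      · have hstep : jRun c0 (c :: rest) ((i : Nat) : Int) (-1, a, b)
            = jRun c0 rest (((i : Nat) : Int) + 1) (-1, a, b + 1) := by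
          simp [jRun, hc', hu]
        rw [hstep, hcast, ih (i + 1) a (b + 1)]
        cases hf : firstIdx c0 rest with
        | some m =>
          simp [firstIdx, hc, hf, countU_cons, hu, Prod.mk.injEq]
          all_goals try constructor
          all_goals try constructor
          all_goals first | (push_cast; ring) | ring | omega
        | none =>
          simp [firstIdx, hc, hf, countU_cons, hu, Prod.mk.injEq]
          all_goals try constructor
          all_goals first | ring | omega
      · have hstep : jRun c0 (c :: rest) ((i : Nat) : Int) (-1, a, b)
            = jRun c0 rest (((i : Nat) : Int) + 1) (-1, a, b) := by
          simp [jRun, hc', hu]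
        rw [hstep, hcast, ih (i + 1) a b]
        cases hf : firstIdx c0 rest with
        | some m =>
          simp [firstIdx, hc, hf, countU_cons, hu, Prod.mk.injEq]
          all_goals try constructor
          all_goals try constructor
          all_goals first | (push_cast; ring) | ring | omega
        | none =>
          simp [firstIdx, hc, hf, countU_cons, hu, Prod.mk.injEq]
          all_goals try constructor
          all_goals first | ring | omega

lemma firstIdx_spec_some (c0 : Char) :
    ∀ (l : List Char) (m : Nat), firstIdx c0 l = some m →
      l[m]? = some c0 ∧ ∀ i, i < m → l[i]? ≠ some c0 := by
  intro l
  induction l with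
  | nil => intro m h; simp [firstIdx] at h
  | cons c rest ih =>
    intro m h
    by_cases hc : c = c0
    · have h' : m = 0 := by simpa [firstIdx, hc] using h.symm
      subst h'
      exact ⟨by simp [hc], fun i hi => by omega⟩
    · simp only [firstIdx, if_neg hc] at h
      cases hf : firstIdx c0 rest with
      | none => rw [hf] at h; simp at h
      | some m' =>
        rw [hf] at h
        simp at h
        subst h
        obtain ⟨h1, h2⟩ := ih m' hf
        refine ⟨by simpa using h1, ?_⟩
        intro i hi
        cases i with
        | zero =>
          simp only [List.getElem?_cons_zero]
          exact fun e => hc (Option.some.inj e)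
        | succ n =>
          rw [List.getElem?_cons_succ]
          exact h2 n (by omega)

lemma firstIdx_none_iff (c0 : Char) (l : List Char) :
    firstIdx c0 l = none ↔ c0 ∉ l := by
  induction l with
  | nil => simp [firstIdx]
  | cons c rest ih =>
    by_cases hc : c = c0
    · subst hc; simp [firstIdx]
    · simp only [firstIdx, if_neg hc]
      cases hf : firstIdx c0 rest with
      | none =>
        constructor
        · intro _
          rw [List.mem_cons]
          rintro (e | h2)
          · exact hc e.symm
          · exact (ih.1 hf) h2
        · intro _; rfl
      | some m =>
        constructor
        · intro h; simp at h
        · intro h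
          exfalso
          have h2 : c0 ∉ rest := fun hm => h (List.mem_cons_of_mem _ hm)
          have h3 := ih.2 h2
          rw [hf] at h3
          simp at h3

lemma findFrom_one_eq (c0 : Char) (rest : List Char) :
    PySem.Chars.findFrom (c0 :: rest) [c0] 1
      = (match firstIdx c0 rest with
         | some m => (((1 + m : Nat) : Int))
         | none => (-1 : Int)) := by
  have h1 : (1 : Nat) ≤ (c0 :: rest).length := by simp
  have hmain := PySem.Chars.findFrom_natCast (c0 :: rest) [c0] 1 h1
  rw [show ((1 : Nat) : Int) = (1 : Int) by norm_num] at hmain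
  rw [hmain]
  simp only [List.drop_one, List.tail_cons]
  cases hf : firstIdx c0 rest with
  | none =>
    have hmem : c0 ∉ rest := (firstIdx_none_iff c0 rest).1 hf
    have : PySem.Chars.find rest [c0] = -1 :=
      (PySem.Chars.find_eq_neg_one_iff rest [c0]).2 (by rw [sing_infix]; exact hmem)
    simp [this]
  | some m =>
    obtain ⟨h1', h2'⟩ := firstIdx_spec_some c0 rest m hf
    have hfind : PySem.Chars.find rest [c0] = (m : Int) := find_sing_eq rest c0 m h1' h2'
    have hne : ((m : Int) ≠ -1) := by omega
    simp [hfind, hne]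

lemma kRun_one (c0 : Char) (rest : List Char) :
    kRun c0 rest 1 (-1)
      = (match scanB c0 rest 1 with
         | some m => ((m : Nat) : Int)
         | none => (-1 : Int)) := by
  have h := kRun_eq_scanB c0 rest 1
  rw [show ((1 : Nat) : Int) = (1 : Int) by norm_num] at h
  exact h

lemma jRun_one (c0 : Char) (rest : List Char) (a b : Int) :
    jRun c0 rest 1 (-1, a, b)
      = (match firstIdx c0 rest with
         | some m => (((1 + m : Nat) : Int), b + countU (rest.take m), b + countU (rest.take m))
         | none => (-1, a, b + countU rest)) := by
  have h := jRun_spec c0 rest 1 a b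
  rw [show ((1 : Nat) : Int) = (1 : Int) by norm_num] at h
  exact h

lemma slice_take (cs : List Char) (n : Nat) :
    PySem.List.slice cs (some 0) (some ((n : Nat) : Int)) = cs.take n := by
  simpa using PySem.List.slice_to cs n

lemma B_eq_altSpec (formula : String) : get_first_elem_alt formula = altSpec formula := by
  unfold get_first_elem_alt altSpec
  cases h : formula.toList with
  | nil => rfl
  | cons c0 rest =>
    simp only [loopB_split, kRun_one, jRun_one, findFrom_one_eq]
    cases hf : firstIdx c0 rest with
    | none =>
      simp only
      cases hscan : scanB c0 rest 1 with
      | none => simp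
      | some i => simp
    | some m =>
      simp only
      have hJm : ¬((1 : Int) + (m : Int) = -1) := by omega
      have hJ : (((1 + m : Nat) : Int) ≠ -1) := by push_cast; omega
      have hcnt : countU (PySem.List.slice (c0 :: rest) none (some (1 + (m : Int))))
          = (if PySem.Chars.isupper c0 then (1 : Int) else 0) + countU (rest.take m) := by
        have h1 : PySem.List.slice (c0 :: rest) none (some (1 + (m : Int)))
            = (c0 :: rest).take (1 + m) := by
          have h2 := slice_take (c0 :: rest) (1 + m)
          have h3 : ((1 + m : Nat) : Int) = 1 + (m : Int) := by push_cast; ring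
          simpa [h3] using h2
        rw [h1, show (1 + m) = m + 1 by omega]
        simp only [List.take_succ_cons]
        rw [countU_cons]
      by_cases hsp : specialB c0 = true
      · by_cases hX : (((PySem.List.pyGet? (c0 :: rest) 1).getD ' ' == c0
             || PySem.Chars.islower ((PySem.List.pyGet? (c0 :: rest) 1).getD ' '))) = true
        · by_cases hcU : ((if PySem.Chars.isupper c0 then (1 : Int) else 0) + countU (rest.take m)) = 1
          · simp [hsp, hJ, hJm, hX, hcnt, hcU]
          · simp only [hsp, hcnt]
            simp [hJ, hJm, hX, hcnt, hcU]
            cases hscan : scanB c0 rest 1 with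
            | none => simp
            | some i => simp
        · have hX' : (((PySem.List.pyGet? (c0 :: rest) 1).getD ' ' == c0
             || PySem.Chars.islower ((PySem.List.pyGet? (c0 :: rest) 1).getD ' '))) = false := by
            simpa using hX
          simp [hX', hcnt]
          cases hscan : scanB c0 rest 1 with
          | none => simp
          | some i => simp
      · have hsp' : specialB c0 = false := by simpa using hsp
        simp only [hsp']
        simp
        cases hscan : scanB c0 rest 1 with
        | none => simp
        | some i => simp

-- ===== VERDICT (by name: the statement is the Claim_ definition above) =====
theorem get_first_elem_spec : Claim_equal_get_first_elem := by
  intro formula _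
  unfold Spec_get_first_elem
  rw [A_eq_altSpec, B_eq_altSpec]
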